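-- pv_equiv track=rewrite | github.com/Chandrasekha-prog/ai_assistant | julie.py | detect_search_platform
-- ===== SOURCE A (Python) =====
-- def detect_search_platform(command):
--     """Detect which platform to search on"""
--     platforms = {
--         "google": any(word in command for word in ["google", "web", "internet"]),
--         "youtube": any(word in command for word in ["youtube", "video"]),
--         "wikipedia": any(word in command for word in ["wikipedia", "wiki"]),
--         "amazon": any(word in command for word in ["amazon", "shop", "buy"]),
--         "github": any(word in command for word in ["github", "code", "programming"]),
--         "linkedin": any(word in command for word in ["linkedin", "job", "career"]),
--         "twitter": any(word in command for word in ["twitter", "tweet"]),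
--         "reddit": any(word in command for word in ["reddit"]),
--         "bing": any(word in command for word in ["bing"]),
--         "duckduckgo": any(word in command for word in ["duckduckgo"]),
--         "news": any(word in command for word in ["news", "headlines"]),
--         "spotify": any(word in command for word in ["spotify", "music", "song"])
--     }
--
--     for platform, condition in platforms.items():
--         if condition:
--             return platform
--
--     return "google"  # Default platform
-- ===== SOURCE B (Python) =====
-- # B: flatten the table to keyword tags (priority, platform), collect all matching
-- # tags, and select the minimum-priority one with min(); default "google" if none.
-- _TABLE = [
--     ("google", ["google", "web", "internet"]),
--     ("youtube", ["youtube", "video"]),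
--     ("wikipedia", ["wikipedia", "wiki"]),
--     ("amazon", ["amazon", "shop", "buy"]),
--     ("github", ["github", "code", "programming"]),
--     ("linkedin", ["linkedin", "job", "career"]),
--     ("twitter", ["twitter", "tweet"]),
--     ("reddit", ["reddit"]),
--     ("bing", ["bing"]),
--     ("duckduckgo", ["duckduckgo"]),
--     ("news", ["news", "headlines"]),
--     ("spotify", ["spotify", "music", "song"]),
-- ]
--
-- _FLAT = [(kw, (i, plat)) for i, (plat, kws) in enumerate(_TABLE) for kw in kws]
--
-- def detect_search_platform(command):
--     hits = [tag for kw, tag in _FLAT if kw in command]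
--     return min(hits)[1] if hits else "google"
-- ===== Notes on version B (the rewrite author's own statement) =====
-- stated objective: alternative
-- what changed: B flattens the platform table into keyword tags (priority, platform), collects every tag whose keyword occurs in the command, and returns the platform of the minimum tag via min() (default 'google'), replacing A's eagerly-built dict of twelve any() booleans scanned in order for the first true one.
import Mathlib
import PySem

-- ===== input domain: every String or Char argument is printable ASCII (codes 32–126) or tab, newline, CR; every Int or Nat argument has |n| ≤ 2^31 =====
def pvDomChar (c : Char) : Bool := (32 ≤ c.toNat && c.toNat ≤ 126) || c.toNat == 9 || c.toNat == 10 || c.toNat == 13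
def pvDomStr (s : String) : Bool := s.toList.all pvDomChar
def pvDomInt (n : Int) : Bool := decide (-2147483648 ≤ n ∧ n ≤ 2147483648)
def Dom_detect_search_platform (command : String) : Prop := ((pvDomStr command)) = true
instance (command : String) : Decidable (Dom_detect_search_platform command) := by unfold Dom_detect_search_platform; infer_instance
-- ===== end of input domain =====

-- B selects the minimum-priority keyword tag among all matches instead of A's ordered scan of precomputed booleans (objective: alternative).

-- ===== PORT A =====
-- the dict literal of eagerly computed any(...) booleans
def pvATable (command : String) : PySem.Dict String Bool :=
  PySem.Dict.ofList
    [ ("google", (["google", "web", "internet"].any (fun w => PySem.Str.isIn w command)))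
    , ("youtube", (["youtube", "video"].any (fun w => PySem.Str.isIn w command)))
    , ("wikipedia", (["wikipedia", "wiki"].any (fun w => PySem.Str.isIn w command)))
    , ("amazon", (["amazon", "shop", "buy"].any (fun w => PySem.Str.isIn w command)))
    , ("github", (["github", "code", "programming"].any (fun w => PySem.Str.isIn w command)))
    , ("linkedin", (["linkedin", "job", "career"].any (fun w => PySem.Str.isIn w command)))
    , ("twitter", (["twitter", "tweet"].any (fun w => PySem.Str.isIn w command)))
    , ("reddit", (["reddit"].any (fun w => PySem.Str.isIn w command)))
    , ("bing", (["bing"].any (fun w => PySem.Str.isIn w command)))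
    , ("duckduckgo", (["duckduckgo"].any (fun w => PySem.Str.isIn w command)))
    , ("news", (["news", "headlines"].any (fun w => PySem.Str.isIn w command)))
    , ("spotify", (["spotify", "music", "song"].any (fun w => PySem.Str.isIn w command))) ]

-- "for platform, condition in platforms.items(): if condition: return platform"
def pvAScan : List (String × Bool) → String
  | [] => "google"          -- default platform
  | (platform, condition) :: rest => if condition then platform else pvAScan rest

def detect_search_platform (command : String) : String :=
  pvAScan (pvATable command).items

-- ===== PORT B =====
def pvTable : List (String × List String) :=
  [ ("google", ["google", "web", "internet"])
  , ("youtube", ["youtube", "video"])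
  , ("wikipedia", ["wikipedia", "wiki"])
  , ("amazon", ["amazon", "shop", "buy"])
  , ("github", ["github", "code", "programming"])
  , ("linkedin", ["linkedin", "job", "career"])
  , ("twitter", ["twitter", "tweet"])
  , ("reddit", ["reddit"])
  , ("bing", ["bing"])
  , ("duckduckgo", ["duckduckgo"])
  , ("news", ["news", "headlines"])
  , ("spotify", ["spotify", "music", "song"]) ]

-- "[(kw, (i, plat)) for i, (plat, kws) in enumerate(_TABLE) for kw in kws]"
def pvFlatten (i : Nat) : List (String × List String) → List (String × (Nat × String))
  | [] => []
  | (plat, kws) :: rest => kws.map (fun kw => (kw, (i, plat))) ++ pvFlatten (i + 1) rest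

def pvFlat : List (String × (Nat × String)) := pvFlatten 0 pvTable

-- Python tuple '<' on (int, str), used by min(); min keeps the FIRST minimal element
def pvLt (a b : Nat × String) : Bool := a.1 < b.1 || (a.1 == b.1 && a.2 < b.2)

def pvMinFold (best : Nat × String) : List (Nat × String) → Nat × String
  | [] => best
  | x :: rest => pvMinFold (if pvLt x best then x else best) rest

def detect_search_platform_alt (command : String) : String :=
  match (pvFlat.filter (fun p => PySem.Str.isIn p.1 command)).map Prod.snd with
  | [] => "google"
  | h :: t => (pvMinFold h t).2

-- ===== PRECONDITION & SPEC =====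
def Spec_detect_search_platform (command : String) (out : String) : Prop := out = detect_search_platform_alt command
instance (command : String) (out : String) : Decidable (Spec_detect_search_platform command out) := by unfold Spec_detect_search_platform; infer_instance

-- ===== CLAIM (what is proved, stated in full; the proofs are below) =====
def Claim_equal_detect_search_platform : Prop := ∀ (command : String), Dom_detect_search_platform command → Spec_detect_search_platform command (detect_search_platform command)

-- ===== LEMMAS AND PROOFS =====

-- A's items list is the keyword table with each keyword list replaced by its eager any() boolean.
theorem pvItems_eq (command : String) :
    (pvATable command).items
      = pvTable.map (fun p => (p.1, p.2.any (fun w => PySem.Str.isIn w command))) := by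
  simp [pvATable, pvTable, PySem.Dict.ofList, PySem.Dict.update, PySem.Dict.insert, PySem.Dict.contains, PySem.Dict.empty, List.foldl]

-- every tag coming out of pvFlatten i has priority ≥ i
theorem pvFlatten_fst_ge (i : Nat) (T : List (String × List String)) :
    ∀ x ∈ pvFlatten i T, i ≤ x.2.1 := by
  induction T generalizing i with
  | nil => simp [pvFlatten]
  | cons hd tl ih =>
      obtain ⟨plat, kws⟩ := hd
      intro x hx
      simp only [pvFlatten, List.mem_append, List.mem_map] at hx
      rcases hx with ⟨kw, _, rfl⟩ | hx
      · exact le_refl i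
      · exact Nat.le_of_succ_le (ih (i + 1) x hx)

-- folding min over elements never smaller than best leaves best
theorem pvMinFold_fixed (best : Nat × String) (xs : List (Nat × String))
    (h : ∀ x ∈ xs, pvLt x best = false) : pvMinFold best xs = best := by
  induction xs with
  | nil => rfl
  | cons x rest ih =>
      simp only [pvMinFold, h x (by simp)]
      exact ih (fun y hy => h y (by simp [hy]))

theorem pvLt_self (a : Nat × String) : pvLt a a = false := by
  simp [pvLt]

-- the core equivalence, generic in the table and the starting priority
theorem pvMain (command : String) (T : List (String × List String)) (i : Nat) :
    pvAScan (T.map (fun p => (p.1, p.2.any (fun w => PySem.Str.isIn w command)))) =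
      (match ((pvFlatten i T).filter (fun p => PySem.Str.isIn p.1 command)).map Prod.snd with
       | [] => "google"
       | h :: t => (pvMinFold h t).2) := by
  induction T generalizing i with
  | nil => rfl
  | cons hd tl ih =>
      obtain ⟨plat, kws⟩ := hd
      have hblock :
          ((kws.map (fun kw => (kw, (i, plat)))).filter (fun p => PySem.Str.isIn p.1 command)).map Prod.snd
            = (kws.filter (fun w => PySem.Str.isIn w command)).map (fun _ => (i, plat)) := by
        simp only [List.filter_map, List.map_map]
        rfl
      simp only [pvFlatten, List.map_cons, pvAScan, List.filter_append, List.map_append, hblock]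
      by_cases hany : kws.any (fun w => PySem.Str.isIn w command)
      · -- some keyword of the head platform matches: A returns plat, B's min is (i, plat)
        simp only [hany, if_true]
        obtain ⟨k, ks, hks⟩ : ∃ k ks, kws.filter (fun w => PySem.Str.isIn w command) = k :: ks := by
          rcases h : kws.filter (fun w => PySem.Str.isIn w command) with _ | ⟨k, ks⟩
          · exfalso
            rw [List.filter_eq_nil_iff] at h
            rw [List.any_eq_true] at hany
            obtain ⟨w, hw, hwin⟩ := hany
            exact h w hw hwin
          · exact ⟨k, ks, rfl⟩
        rw [hks]
        simp only [List.map_cons, List.cons_append]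
        have hfix : pvMinFold (i, plat)
            ((ks.map (fun _ => (i, plat))) ++
              ((pvFlatten (i+1) tl).filter (fun p => PySem.Str.isIn p.1 command)).map Prod.snd)
            = (i, plat) := by
          apply pvMinFold_fixed
          intro x hx
          rcases List.mem_append.mp hx with hx | hx
          · obtain ⟨_, _, rfl⟩ := List.mem_map.mp hx
            exact pvLt_self _
          · obtain ⟨p, hp, rfl⟩ := List.mem_map.mp hx
            have hge : i + 1 ≤ p.2.1 := pvFlatten_fst_ge (i+1) tl p (List.mem_filter.mp hp).1
            simp only [pvLt]
            have h1 : ¬ p.2.1 < i := by omega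
            have h2 : ¬ p.2.1 = i := by omega
            simp [h1, h2]
        rw [hfix]
      · -- no keyword of the head matches: the head block contributes nothing
        have hnil : kws.filter (fun w => PySem.Str.isIn w command) = [] := by
          rw [List.filter_eq_nil_iff]
          intro w hw
          rw [List.any_eq_true] at hany
          exact fun hc => hany ⟨w, hw, hc⟩
        simp only [Bool.not_eq_true] at hany
        simp only [hany, hnil, List.map_nil, List.nil_append]
        exact ih (i + 1)

-- ===== VERDICT (by name: the statement is the Claim_ definition above) =====
theorem detect_search_platform_spec : Claim_equal_detect_search_platform := by
  intro command _
  unfold Spec_detect_search_platform detect_search_platform detect_search_platform_alt pvFlat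
  rw [pvItems_eq, pvMain command pvTable 0]
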